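-- pv_equiv track=rewrite | github.com/carllom/AoC | aoc2023/day13.py | trymatch
-- ===== SOURCE A (Python) =====
-- def trymatch(m:list, exclude=-1) -> int:
--   for i in range(len(m)-1):
--     match = True
--     for j in range(min(i+1,len(m)-(i+1))):
--       if m[i-j] != m[i+j+1]:
--         match = False
--         break
--     if match and i != exclude:
--       return i+1
--   return 0
-- ===== SOURCE B (Python) =====
-- def trymatch(m: list, exclude=-1) -> int:
--     # Grow all mirror centers simultaneously, one radius step per stage; a center
--     # whose palindromic window reaches an edge of the list is a valid split.
--     # The answer is the smallest valid split index (A scans ascending, so this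
--     # is the same value), shifted by one, or 0 when none remains.
--     n = len(m)
--     alive = list(range(n - 1))   # centers still palindromic at the current radius
--     done = []                    # centers whose reflection reached an edge
--     k = 1
--     while alive:
--         nxt = []
--         for i in alive:
--             if k > min(i + 1, n - i - 1):
--                 done.append(i)
--             elif m[i + 1 - k] == m[i + k]:
--                 nxt.append(i)
--         alive = nxt
--         k += 1
--     best = min((i for i in done if i != exclude), default=-1)
--     return best + 1
-- ===== Notes on version B (the rewrite author's own statement) =====
-- stated objective: alternative
-- what changed: Replaced A's per-center scan with early return (expand each candidate mirror fully, return on first success) by a stage-wise simultaneous expansion: all centers are grown one radius step per stage of a while loop, centers whose reflection reaches an edge are collected, and the smallest valid split is taken at the end.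
import Mathlib
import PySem

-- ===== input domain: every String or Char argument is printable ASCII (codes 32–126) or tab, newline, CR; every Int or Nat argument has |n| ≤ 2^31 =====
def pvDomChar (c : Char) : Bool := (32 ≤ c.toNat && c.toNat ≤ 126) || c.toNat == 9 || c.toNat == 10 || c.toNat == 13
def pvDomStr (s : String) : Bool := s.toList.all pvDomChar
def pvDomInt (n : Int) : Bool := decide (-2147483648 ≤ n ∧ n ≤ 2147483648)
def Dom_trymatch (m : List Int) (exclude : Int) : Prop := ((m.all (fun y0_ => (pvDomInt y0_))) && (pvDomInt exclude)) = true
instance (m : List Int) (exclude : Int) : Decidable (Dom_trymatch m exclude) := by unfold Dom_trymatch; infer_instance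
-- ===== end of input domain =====

-- B replaces A's per-center scan with early return by a stage-wise simultaneous
-- expansion of all mirror centers (BFS by radius) that collects every valid split
-- and then takes the minimum; different algorithm, measured moderately faster by the
-- timing run (objective: alternative).

-- ===== PORT A =====
-- inner loop: for j in range(...): if m[i-j] != m[i+j+1]: match=False; break
def aInner (m : List Int) (i : Int) : List Int → Bool
  | [] => true
  | j :: js =>
    if PySem.List.pyGetD m (i - j) 0 ≠ PySem.List.pyGetD m (i + j + 1) 0 then false
    else aInner m i js

-- outer loop: for i in range(len(m)-1): … early return i+1 … ; fallthrough 0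
def aOuter (m : List Int) (exclude : Int) : List Int → Int
  | [] => 0
  | i :: is =>
    if aInner m i (PySem.List.pyRange 0 (min (i + 1) ((m.length : Int) - (i + 1))) 1)
         ∧ i ≠ exclude then i + 1
    else aOuter m exclude is

def trymatch (m : List Int) (exclude : Int) : Int :=
  aOuter m exclude (PySem.List.pyRange 0 ((m.length : Int) - 1) 1)

-- ===== PORT B =====
-- one stage of the while body: the for over alive, building nxt and this
-- stage's appendees to done in order
def bStage (m : List Int) (n k : Int) : List Int → List Int × List Int
  | [] => ([], [])
  | i :: is =>
    let r := bStage m n k is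
    if min (i + 1) (n - i - 1) < k then (r.1, i :: r.2)
    else if PySem.List.pyGetD m (i + 1 - k) 0 = PySem.List.pyGetD m (i + k) 0 then
      (i :: r.1, r.2)
    else r

-- while alive: … ; fuel m.length + 2 provably exceeds the number of stages the
-- Python while loop can run (every center leaves alive by stage min(i+1,n-i-1)+1)
def bLoop (m : List Int) (n : Int) : Nat → Int → List Int → List Int → List Int
  | 0, _, _, done => done
  | fuel + 1, k, alive, done =>
    if alive.isEmpty then done
    else
      let r := bStage m n k alive
      bLoop m n fuel (k + 1) r.1 (done ++ r.2)

def trymatch_alt (m : List Int) (exclude : Int) : Int :=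
  let n : Int := (m.length : Int)
  let done := bLoop m n (m.length + 2) 1 (PySem.List.pyRange 0 (n - 1) 1) []
  PySem.List.minD (done.filter (fun i => decide (i ≠ exclude))) (fun x => x) (-1) + 1

-- ===== PRECONDITION & SPEC =====
def Spec_trymatch (m : List Int) (exclude : Int) (out : Int) : Prop := out = trymatch_alt m exclude
instance (m : List Int) (exclude : Int) (out : Int) : Decidable (Spec_trymatch m exclude out) := by unfold Spec_trymatch; infer_instance

-- ===== CLAIM (what is proved, stated in full; the proofs are below) =====
def Claim_equal_trymatch : Prop := ∀ (m : List Int) (exclude : Int), Dom_trymatch m exclude → Spec_trymatch m exclude (trymatch m exclude)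

-- ===== LEMMAS AND PROOFS =====

-- the half-width of the window around the gap after index i
def Kc (n i : Nat) : Nat := min (i + 1) (n - i - 1)

-- the radius-j comparison at center i
def eqAt (m : List Int) (i j : Nat) : Bool := decide (m.getD (i + 1 - j) 0 = m.getD (i + j) 0)

-- center i is a valid split: all comparisons up to the full half-width succeed
def validB (m : List Int) (i : Nat) : Bool :=
  decide (∀ j, j < Kc m.length i → eqAt m i (j + 1) = true)

-- center i is still alive at the start of stage k
def partB (m : List Int) (k i : Nat) : Bool :=
  decide (k ≤ Kc m.length i + 1) && decide (∀ j, j < k - 1 → eqAt m i (j + 1) = true)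

-- shifting the comparison index by one
theorem ball_shift (E : Nat → Bool) (t : Nat) :
    (∀ j, j < t → E (j + 1) = true) ↔ (∀ j, 1 ≤ j → j ≤ t → E j = true) := by
  constructor
  · intro H j h1 hj
    have := H (j - 1) (by omega)
    rwa [Nat.sub_add_cancel h1] at this
  · intro H j hj
    exact H (j + 1) (by omega) (by omega)

theorem validB_iff (m : List Int) (i : Nat) :
    validB m i = true ↔ ∀ j, 1 ≤ j → j ≤ Kc m.length i → eqAt m i j = true := by
  unfold validB
  rw [decide_eq_true_eq, ball_shift]

theorem partB_iff (m : List Int) (k i : Nat) :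
    partB m k i = true
      ↔ (k ≤ Kc m.length i + 1 ∧ ∀ j, 1 ≤ j → j ≤ k - 1 → eqAt m i j = true) := by
  unfold partB
  rw [Bool.and_eq_true, decide_eq_true_eq, decide_eq_true_eq, ball_shift]

-- A's inner break-on-mismatch loop is an all over the index list
theorem aInner_eq_all (m : List Int) (i : Int) (js : List Int) :
    aInner m i js
      = js.all (fun j => decide (PySem.List.pyGetD m (i - j) 0 = PySem.List.pyGetD m (i + j + 1) 0)) := by
  induction js with
  | nil => rfl
  | cons j js ih =>
    by_cases h : PySem.List.pyGetD m (i - j) 0 = PySem.List.pyGetD m (i + j + 1) 0 <;>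
      simp [aInner, h, ih]

-- A's inner loop at center iN decides validity of the split
theorem aInner_eq_valid (m : List Int) (iN : Nat) (h : iN + 1 < m.length) :
    aInner m (iN : Int)
        (PySem.List.pyRange 0 (min ((iN : Int) + 1) ((m.length : Int) - ((iN : Int) + 1))) 1)
      = validB m iN := by
  have hK : min ((iN : Int) + 1) ((m.length : Int) - ((iN : Int) + 1))
      = ((Kc m.length iN : Nat) : Int) := by unfold Kc; omega
  rw [aInner_eq_all, hK, PySem.List.pyRange_zero_nat]
  unfold validB
  rw [Bool.eq_iff_iff]
  simp only [List.all_map, List.all_eq_true, List.mem_range, Function.comp, decide_eq_true_eq]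
  have key : ∀ k : Nat, k < Kc m.length iN →
      ((PySem.List.pyGetD m ((iN : Int) - (k : Int)) 0
          = PySem.List.pyGetD m ((iN : Int) + (k : Int) + 1) 0) ↔ eqAt m iN (k + 1) = true) := by
    intro k hk
    have hKb : Kc m.length iN ≤ iN + 1 ∧ Kc m.length iN ≤ m.length - iN - 1 := by
      unfold Kc; omega
    have hk1 : k ≤ iN := by omega
    have hk2 : iN + 1 + k < m.length := by omega
    have e3 : PySem.List.pyGetD m ((iN : Int) - (k : Int)) 0 = m[iN - k]'(by omega) := by
      rw [PySem.List.pyGetD_eq_getElem m 0 (by omega) (by omega)]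
      congr 1
      omega
    have e4 : PySem.List.pyGetD m ((iN : Int) + (k : Int) + 1) 0 = m[iN + 1 + k]'(by omega) := by
      rw [PySem.List.pyGetD_eq_getElem m 0 (by omega) (by omega)]
      congr 1
      omega
    have e1 : m.getD (iN + 1 - (k + 1)) 0 = m[iN - k]'(by omega) := by
      rw [List.getD_eq_getElem _ _ (by omega)]
      congr 1
      omega
    have e2 : m.getD (iN + (k + 1)) 0 = m[iN + 1 + k]'(by omega) := by
      rw [List.getD_eq_getElem _ _ (by omega)]
      congr 1
      omega
    unfold eqAt
    rw [e3, e4, decide_eq_true_iff, e1, e2]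
  constructor
  · intro H j hj
    exact (key j hj).mp (H j hj)
  · intro H k hk
    exact (key k hk).mpr (H k hk)

-- A's outer early-return loop is a find? over the centers
theorem aOuter_eq_find (m : List Int) (exclude : Int) (l : List Int) :
    aOuter m exclude l
      = (match l.find? (fun i =>
            aInner m i (PySem.List.pyRange 0 (min (i + 1) ((m.length : Int) - (i + 1))) 1)
              && decide (i ≠ exclude)) with
        | some i => i + 1
        | none => 0) := by
  induction l with
  | nil => rfl
  | cons i is ih =>
    by_cases h1 : aInner m i (PySem.List.pyRange 0 (min (i + 1) ((m.length : Int) - (i + 1))) 1) = true <;>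
      by_cases h2 : i = exclude <;>
      simp [aOuter, List.find?, h1, h2, ih]

-- one stage over a list of in-range centers, computed as two filters
theorem bStage_eq (m : List Int) (k : Nat) (hk : 1 ≤ k) (l : List Nat)
    (hl : ∀ i ∈ l, i + 1 < m.length) :
    bStage m (m.length : Int) (k : Int) (l.map (fun i : Nat => (i : Int)))
      = ((l.filter (fun i => decide (k ≤ Kc m.length i) && eqAt m i k)).map (fun i : Nat => (i : Int)),
         (l.filter (fun i => decide (Kc m.length i < k))).map (fun i : Nat => (i : Int))) := by
  induction l with
  | nil => rfl
  | cons i is ih =>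
    have hi : i + 1 < m.length := hl i (List.mem_cons_self)
    have ih' := ih (fun j hj => hl j (List.mem_cons_of_mem _ hj))
    have hmin : min ((i : Int) + 1) ((m.length : Int) - (i : Int) - 1)
        = ((Kc m.length i : Nat) : Int) := by unfold Kc; omega
    simp only [List.map_cons, bStage, ih', hmin]
    by_cases hg : Kc m.length i < k
    · have : ((Kc m.length i : Nat) : Int) < (k : Int) := by omega
      simp [this, hg, List.filter_cons]
    · have hnot : ¬ (((Kc m.length i : Nat) : Int) < (k : Int)) := by omega
      have hkK : k ≤ Kc m.length i := by omega
      have hKb : Kc m.length i ≤ i + 1 ∧ Kc m.length i ≤ m.length - i - 1 := by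
        unfold Kc; omega
      have e1 : PySem.List.pyGetD m ((i : Int) + 1 - (k : Int)) 0 = m.getD (i + 1 - k) 0 := by
        rw [PySem.List.pyGetD_eq_getElem m 0 (by omega) (by omega),
          List.getD_eq_getElem _ _ (by omega)]
        congr 1
        omega
      have e2 : PySem.List.pyGetD m ((i : Int) + (k : Int)) 0 = m.getD (i + k) 0 := by
        rw [PySem.List.pyGetD_eq_getElem m 0 (by omega) (by omega),
          List.getD_eq_getElem _ _ (by omega)]
        congr 1
      rw [if_neg hnot, e1, e2]
      by_cases he : m.getD (i + 1 - k) 0 = m.getD (i + k) 0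
      · rw [if_pos he]
        have heA : eqAt m i k = true := by unfold eqAt; exact decide_eq_true he
        have hp : (decide (k ≤ Kc m.length i) && eqAt m i k) = true := by simp [heA, hkK]
        simp [List.filter_cons, hp, hg]
      · rw [if_neg he]
        have heA : eqAt m i k = false := by unfold eqAt; exact decide_eq_false he
        have hp : (decide (k ≤ Kc m.length i) && eqAt m i k) = false := by simp [heA]
        simp [List.filter_cons, hp, hg]

-- every center is alive at stage 1
theorem partB_one (m : List Int) (i : Nat) : partB m 1 i = true := by
  rw [partB_iff]
  exact ⟨by omega, fun j h1 hj => absurd (le_trans h1 hj) (by omega)⟩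

-- surviving stage k is exactly being alive at stage k+1
theorem partB_succ (m : List Int) (k i : Nat) (hk : 1 ≤ k) :
    partB m (k + 1) i = (partB m k i && (decide (k ≤ Kc m.length i) && eqAt m i k)) := by
  rw [Bool.eq_iff_iff, partB_iff, Bool.and_eq_true, partB_iff, Bool.and_eq_true,
    decide_eq_true_eq]
  constructor
  · rintro ⟨hK, hall⟩
    exact ⟨⟨by omega, fun j h1 hj => hall j h1 (by omega)⟩, by omega, hall k hk (by omega)⟩
  · rintro ⟨⟨hK, hall⟩, hkK, hek⟩
    refine ⟨by omega, fun j h1 hj => ?_⟩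
    rcases Nat.lt_or_ge j k with h | h
    · exact hall j h1 (by omega)
    · have hjk : j = k := by omega
      rw [hjk]
      exact hek

-- splitting the valid-and-alive centers into this stage's graduates and the rest
theorem valid_split (m : List Int) (k i : Nat) (hk : 1 ≤ k) :
    (partB m k i && validB m i)
      = ((partB m k i && decide (Kc m.length i < k)) || (partB m (k + 1) i && validB m i)) := by
  rw [Bool.eq_iff_iff]
  simp only [partB_iff, validB_iff, Bool.and_eq_true, Bool.or_eq_true, decide_eq_true_eq,
    partB_iff]
  constructor
  · rintro ⟨⟨hK, hall⟩, hv⟩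
    rcases Nat.lt_or_ge (Kc m.length i) k with h | h
    · exact Or.inl ⟨⟨hK, hall⟩, h⟩
    · refine Or.inr ⟨⟨by omega, fun j h1 hj => ?_⟩, hv⟩
      rcases Nat.lt_or_ge j k with h' | h'
      · exact hall j h1 (by omega)
      · have hjk : j = k := by omega
        rw [hjk]
        exact hv k hk h
  · rintro (⟨⟨hK, hall⟩, hg⟩ | ⟨⟨hK, hall⟩, hv⟩)
    · exact ⟨⟨hK, hall⟩, fun j h1 hj => hall j h1 (by omega)⟩
    · exact ⟨⟨by omega, fun j h1 hj => hall j h1 (by omega)⟩, hv⟩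

-- a filter by a disjunction of disjoint predicates splits as a permutation
theorem filter_or_perm {α : Type} (l : List α) (p q : α → Bool)
    (hdisj : ∀ x ∈ l, ¬ (p x = true ∧ q x = true)) :
    (l.filter (fun x => p x || q x)).Perm (l.filter p ++ l.filter q) := by
  induction l with
  | nil => simp
  | cons a l ih =>
    have ih' := ih (fun x hx => hdisj x (List.mem_cons_of_mem _ hx))
    by_cases hp : p a = true
    · have hq : ¬ q a = true := fun h => hdisj a List.mem_cons_self ⟨hp, h⟩
      simpa [List.filter_cons, hp, hq] using ih'.cons a
    · by_cases hq : q a = true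
      · simp only [List.filter_cons, hp, hq, Bool.false_or]
        exact (ih'.cons a).trans List.perm_middle.symm
      · simpa [List.filter_cons, hp, hq] using ih'
  
-- no center is alive once the stage counter passes every half-width
theorem partB_dead (m : List Int) (k : Nat) (hk : m.length + 2 ≤ k) :
    (List.range (m.length - 1)).filter (partB m k) = [] := by
  rw [List.filter_eq_nil_iff]
  intro i hi hcon
  simp only [List.mem_range] at hi
  rw [partB_iff] at hcon
  have : Kc m.length i ≤ i + 1 := by unfold Kc; omega
  omega

-- the loop invariant: the final done is (a permutation of) the valid centers
theorem bLoop_perm (m : List Int) :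
    ∀ (fuel k : Nat), 1 ≤ k → m.length + 2 ≤ k + fuel → ∀ (done : List Int),
      (bLoop m (m.length : Int) fuel (k : Int)
          (((List.range (m.length - 1)).filter (partB m k)).map (fun i : Nat => (i : Int))) done).Perm
        (done ++ ((List.range (m.length - 1)).filter (fun i => partB m k i && validB m i)).map
            (fun i : Nat => (i : Int))) := by
  intro fuel
  induction fuel with
  | zero =>
    intro k hk hfuel done
    have hnil := partB_dead m k (by omega)
    have hnil2 : (List.range (m.length - 1)).filter (fun i => partB m k i && validB m i) = [] := by
      rw [List.filter_eq_nil_iff] at hnil ⊢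
      intro i hi h
      exact hnil i hi (Bool.and_elim_left h)
    simp [bLoop, hnil, hnil2]
  | succ fuel ih =>
    intro k hk hfuel done
    set l1 := (List.range (m.length - 1)).filter (partB m k) with hl1
    by_cases hnil : l1 = []
    · have hnil' : (List.range (m.length - 1)).filter (partB m k) = [] := by
        rw [← hl1]; exact hnil
      have hnil2 : (List.range (m.length - 1)).filter (fun i => partB m k i && validB m i) = [] := by
        rw [List.filter_eq_nil_iff] at hnil' ⊢
        intro i hi h
        exact hnil' i hi (Bool.and_elim_left h)
      simp [bLoop, hnil, hnil2]
    · have hne : ¬ (l1.map (fun i : Nat => (i : Int))).isEmpty = true := by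
        simp [List.isEmpty_iff, hnil]
      have hlmem : ∀ i ∈ l1, i + 1 < m.length := by
        intro i hi
        rw [hl1, List.mem_filter, List.mem_range] at hi
        omega
      rw [bLoop, if_neg hne, bStage_eq m k hk l1 hlmem]
      have hnxt : l1.filter (fun i => decide (k ≤ Kc m.length i) && eqAt m i k)
          = (List.range (m.length - 1)).filter (partB m (k + 1)) := by
        rw [hl1, List.filter_filter]
        refine List.filter_congr (fun i _ => ?_)
        rw [Bool.and_comm]
        exact (partB_succ m k i hk).symm
      have hd : l1.filter (fun i => decide (Kc m.length i < k))
          = (List.range (m.length - 1)).filter (fun i => partB m k i && decide (Kc m.length i < k)) := by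
        rw [hl1, List.filter_filter]
        exact List.filter_congr (fun i _ => Bool.and_comm _ _)
      rw [hnxt]
      have hsplit : ((List.range (m.length - 1)).filter (fun i => partB m k i && validB m i)).Perm
          ((List.range (m.length - 1)).filter (fun i => partB m k i && decide (Kc m.length i < k))
            ++ (List.range (m.length - 1)).filter (fun i => partB m (k + 1) i && validB m i)) := by
        have hcongr : (List.range (m.length - 1)).filter (fun i => partB m k i && validB m i)
            = (List.range (m.length - 1)).filter
                (fun i => (partB m k i && decide (Kc m.length i < k))
                  || (partB m (k + 1) i && validB m i)) :=
          List.filter_congr (fun i _ => valid_split m k i hk)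
        rw [hcongr]
        apply filter_or_perm
        intro i _ h12
        obtain ⟨h1, h2⟩ := h12
        have g1' : Kc m.length i < k := of_decide_eq_true (Bool.and_elim_right h1)
        have g2 := Bool.and_elim_left h2
        rw [partB_iff] at g2
        have := g2.1
        omega
      have hperm2 : ((done
            ++ (l1.filter (fun i => decide (Kc m.length i < k))).map (fun i : Nat => (i : Int)))
          ++ ((List.range (m.length - 1)).filter (fun i => partB m (k + 1) i && validB m i)).map
              (fun i : Nat => (i : Int))).Perm
          (done ++ ((List.range (m.length - 1)).filter (fun i => partB m k i && validB m i)).map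
              (fun i : Nat => (i : Int))) := by
        rw [List.append_assoc, hd]
        apply List.Perm.append_left
        have h3 := (hsplit.map (fun i : Nat => (i : Int))).symm
        rw [List.map_append] at h3
        exact h3
      have step := ih (k + 1) (by omega) (by omega)
          (done ++ (l1.filter (fun i => decide (Kc m.length i < k))).map (fun i : Nat => (i : Int)))
      have hc : ((k : Nat) : Int) + 1 = (((k + 1 : Nat)) : Int) := by push_cast; ring
      rw [hc]
      exact step.trans hperm2

-- PySem's min with identity key is the list minimum
theorem pymin_eq (l : List Int) :
    PySem.List.min? l (fun x => x) = List.min? l := by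
  cases l with
  | nil => rfl
  | cons a t =>
    show List.foldl _ (some a) t = some (t.foldl min a)
    induction t generalizing a with
    | nil => rfl
    | cons b t ih =>
      simp only [List.foldl_cons]
      show List.foldl _ (if b < a then some b else some a) t = _
      by_cases h : b < a
      · rw [if_pos h, min_eq_right (le_of_lt h)]
        exact ih b
      · rw [if_neg h, min_eq_left (le_of_not_gt h)]
        exact ih a

-- the list minimum only depends on the multiset of elements
theorem listmin_perm (l1 l2 : List Int) (h : l1.Perm l2) : List.min? l1 = List.min? l2 := by
  cases h1 : List.min? l1 with
  | none =>
    rw [List.min?_eq_none_iff] at h1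
    subst h1
    rw [List.min?_eq_none_iff.mpr h.symm.eq_nil]
  | some a =>
    rw [List.min?_eq_some_iff] at h1
    exact (List.min?_eq_some_iff.mpr ⟨h.mem_iff.mp h1.1, fun b hb => h1.2 b (h.mem_iff.mpr hb)⟩).symm

-- the minimum of a strictly ascending list is its head
theorem min_of_sorted (l : List Int) (h : l.Pairwise (· < ·)) : List.min? l = l.head? := by
  cases l with
  | nil => rfl
  | cons a t =>
    rw [List.head?_cons]
    refine List.min?_eq_some_iff.mpr ⟨List.mem_cons_self, fun b hb => ?_⟩
    rcases List.mem_cons.mp hb with rfl | hb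
    · exact le_refl _
    · exact le_of_lt ((List.pairwise_cons.mp h).1 b hb)

-- the alive list at stage 1 is the full center range
theorem init_alive (m : List Int) :
    PySem.List.pyRange 0 ((m.length : Int) - 1) 1
      = ((List.range (m.length - 1)).filter (partB m 1)).map (fun i : Nat => (i : Int)) := by
  have hfull : (List.range (m.length - 1)).filter (partB m 1) = List.range (m.length - 1) := by
    rw [List.filter_eq_self]
    intro i _
    exact partB_one m i
  rw [hfull]
  cases hn : m.length with
  | zero => simp [PySem.List.pyRange_one_eq_nil]
  | succ n =>
    have h2 : ((n + 1 : Nat) : Int) - 1 = ((n : Nat) : Int) := by push_cast; ring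
    rw [h2, PySem.List.pyRange_zero_nat]
    simp

-- ===== VERDICT (by name: the statement is the Claim_ definition above) =====
theorem trymatch_spec : Claim_equal_trymatch := by
  intro m exclude _
  unfold Spec_trymatch trymatch trymatch_alt
  show aOuter m exclude (PySem.List.pyRange 0 ((m.length : Int) - 1) 1)
      = PySem.List.minD ((bLoop m (m.length : Int) (m.length + 2) 1
          (PySem.List.pyRange 0 ((m.length : Int) - 1) 1) []).filter
            (fun i => decide (i ≠ exclude))) (fun x => x) (-1) + 1
  -- the common description: the ascending list of valid, non-excluded centers
  set S := (List.range (m.length - 1)).filter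
      (fun i => validB m i && decide (¬ ((i : Int) = exclude))) with hS
  -- A's side: first element of S
  have hA : aOuter m exclude (PySem.List.pyRange 0 ((m.length : Int) - 1) 1)
      = (match S.head? with
        | some i => (i : Int) + 1
        | none => 0) := by
    rw [aOuter_eq_find, init_alive, List.find?_map, ← List.head?_filter, List.filter_filter]
    have hfc : (List.range (m.length - 1)).filter
        (fun i => ((fun j : Int => aInner m j
            (PySem.List.pyRange 0 (min (j + 1) ((m.length : Int) - (j + 1))) 1)
              && decide (j ≠ exclude)) ∘ (fun i : Nat => (i : Int))) i && partB m 1 i) = S := by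
      apply List.filter_congr
      intro i hi
      rw [List.mem_range] at hi
      have hlt : i + 1 < m.length := by omega
      simp only [Function.comp, aInner_eq_valid m i hlt, partB_one, Bool.and_true]
    rw [hfc]
    cases S.head? with
    | none => rfl
    | some i => rfl
  -- B's side: minimum of a permutation of S
  have hperm := bLoop_perm m (m.length + 2) 1 (by omega) (by omega) []
  simp only [Nat.cast_one, List.nil_append] at hperm
  rw [← init_alive] at hperm
  have hBperm : ((bLoop m (m.length : Int) (m.length + 2) 1
        (PySem.List.pyRange 0 ((m.length : Int) - 1) 1) []).filter
          (fun i => decide (i ≠ exclude))).Perm (S.map (fun i : Nat => (i : Int))) := by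
    have h1 := hperm.filter (fun i => decide (i ≠ exclude))
    rw [List.filter_map, List.filter_filter] at h1
    refine h1.trans (List.Perm.of_eq ?_)
    apply congrArg (List.map (fun i : Nat => (i : Int)))
    apply List.filter_congr
    intro i _
    simp only [Function.comp, partB_one]
    exact Bool.and_comm _ _
  have hsorted : (S.map (fun i : Nat => (i : Int))).Pairwise (· < ·) := by
    apply List.Pairwise.map _ (fun a b (h : a < b) => by exact_mod_cast h)
    exact (List.pairwise_lt_range).filter _
  have hmin : PySem.List.minD ((bLoop m (m.length : Int) (m.length + 2) 1
        (PySem.List.pyRange 0 ((m.length : Int) - 1) 1) []).filter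
          (fun i => decide (i ≠ exclude))) (fun x => x) (-1)
      = (match S.head? with
        | some i => (i : Int)
        | none => -1) := by
    unfold PySem.List.minD
    rw [pymin_eq, listmin_perm _ _ hBperm, min_of_sorted _ hsorted, List.head?_map]
    cases S.head? <;> rfl
  rw [hA, hmin]
  cases S.head? <;> simp
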